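-- pv_equiv track=rewrite | github.com/carbonbasednerd/aoc | 2015/day_19/test_thread.py | find_uniques
-- ===== SOURCE A (Python) =====
-- def find_uniques(mol, trans):
--     uniques = set()
--     for t in trans:
--         i = 0
--         search = True
--         while search:
--             m = mol.find(t[0], i)
--             if m > -1:
--                 l = len(t[0])
--                 uniques.add(mol[0:m]+t[1]+mol[m+l:])
--                 i = m + 1
--             else:
--                 search = False
--     return uniques
-- ===== SOURCE B (Python) =====
-- def find_uniques(mol, trans):
--     # Rabin-Karp: per transformation, slide a rolling polynomial hash of a
--     # window of len(pat) over mol; only on a hash hit verify the window and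
--     # splice in the replacement.
--     uniques = set()
--     n = len(mol)
--     for pat, rep in trans:
--         p = len(pat)
--         if p > n:
--             continue
--         B = 1000003
--         M = (1 << 61) - 1
--         target = 0
--         for c in pat:
--             target = (target * B + ord(c)) % M
--         h = 0
--         for c in mol[:p]:
--             h = (h * B + ord(c)) % M
--         pw = B ** p % M
--         i = 0
--         while True:
--             if h == target and mol[i:i + p] == pat:
--                 uniques.add(mol[:i] + rep + mol[i + p:])
--             if i + p == n:
--                 break
--             h = (h * B - ord(mol[i]) * pw + ord(mol[i + p])) % M
--             i += 1
--     return uniques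
-- ===== Notes on version B (the rewrite author's own statement) =====
-- stated objective: alternative
-- what changed: Replaces A's str.find jump-to-next-match loop with a Rabin-Karp search: per transformation a rolling polynomial hash (base 1000003 mod 2^61-1) slides over every window of len(pat), and only on a hash hit the window is verified and the spliced molecule added.
import Mathlib
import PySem

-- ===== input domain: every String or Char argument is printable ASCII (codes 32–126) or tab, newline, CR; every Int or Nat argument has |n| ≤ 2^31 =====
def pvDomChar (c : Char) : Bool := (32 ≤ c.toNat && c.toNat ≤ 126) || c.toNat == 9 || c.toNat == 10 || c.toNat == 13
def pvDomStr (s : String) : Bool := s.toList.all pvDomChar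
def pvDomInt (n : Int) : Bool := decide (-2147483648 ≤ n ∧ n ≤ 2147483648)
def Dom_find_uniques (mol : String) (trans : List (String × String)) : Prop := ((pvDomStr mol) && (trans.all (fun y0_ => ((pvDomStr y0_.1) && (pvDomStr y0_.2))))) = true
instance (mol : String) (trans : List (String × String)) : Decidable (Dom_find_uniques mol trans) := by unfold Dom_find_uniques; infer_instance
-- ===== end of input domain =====

-- B replaces A's str.find jump-to-next-match loop by a Rabin-Karp search with a
-- rolling polynomial hash; a hash hit is verified before the splice is added.

-- ===== PORT A =====
-- findFrom with a start index past the end of the string is -1 (CPython quirk);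
-- needed by the termination argument of the while loop below.
theorem pvFindFromPast (s sub : List Char) (k : Nat) (h : s.length < k) :
    PySem.Chars.findFrom s sub (k : Int) none = -1 := by
  unfold PySem.Chars.findFrom
  have h1 : ((s.length : Int) < (k : Int)) := by exact_mod_cast h
  have h2 : ¬ ((k : Int) < 0) := by omega
  simp [h2]
  omega

-- the 'while search:' loop of A for one transformation t = (t0, t1)
def pvLoopA (molL t0 t1 : List Char) (i : Nat) (u : PySem.Set String) : PySem.Set String :=
  let m := PySem.Chars.findFrom molL t0 (i : Int) none
  if h : m > -1 then
    pvLoopA molL t0 t1 (m.toNat + 1)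
      (PySem.Set.add u (String.ofList (PySem.List.slice molL (some 0) (some m) ++ t1 ++
        PySem.List.slice molL (some (m + (t0.length : Int))) none)))
  else u
termination_by molL.length + 1 - i
decreasing_by
  have h' : PySem.Chars.findFrom molL t0 (i : Int) none > -1 := h
  have hile : i ≤ molL.length := by
    by_contra hgt
    rw [pvFindFromPast molL t0 i (by omega)] at h'
    omega
  have hspec := PySem.Chars.findFrom_natCast_spec molL t0 i hile (by omega)
  have hub := PySem.Chars.findFrom_natCast molL t0 i hile
  have hfl := PySem.Chars.find_le_length (molL.drop i) t0
  have hdl : (molL.drop i).length = molL.length - i := by simp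
  rw [hdl] at hfl
  rw [hub] at hspec h' ⊢
  split at h'
  · omega
  · omega

def find_uniques (mol : String) (trans : List (String × String)) : List String :=
  trans.foldl (fun uniques t => pvLoopA mol.toList t.1.toList t.2.toList 0 uniques)
    PySem.Set.empty

-- ===== PORT B =====
def pvB : Int := 1000003
def pvM : Int := 2305843009213693951   -- (1 << 61) - 1

-- one step of 'acc = (acc * B + ord(c)) % M'
def pvHashStep (h : Int) (c : Char) : Int := (h * pvB + (c.toNat : Int)) % pvM

-- the 'while True:' Rabin-Karp loop of Source B; fuel = exact number of remaining
-- iterations (the loop breaks at i + p = n, so n - p + 1 - i iterations remain);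
-- ord(mol[i]) / ord(mol[i+p]) are ported with getD — both indices are in range
-- whenever the update runs (i + p < n).
def pvRKLoop (molL pat rep : List Char) (target pw : Int) (fuel : Nat) (i : Nat)
    (h : Int) (u : PySem.Set String) : PySem.Set String :=
  match fuel with
  | 0 => u
  | f + 1 =>
    let u' := if h = target ∧
        PySem.List.slice molL (some (i : Int)) (some ((i : Int) + (pat.length : Int))) = pat
      then PySem.Set.add u (String.ofList (PySem.List.slice molL none (some (i : Int)) ++ rep ++
        PySem.List.slice molL (some ((i : Int) + (pat.length : Int))) none))
      else u
    if i + pat.length = molL.length then u'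
    else pvRKLoop molL pat rep target pw f (i + 1)
      ((h * pvB - ((molL.getD i ' ').toNat : Int) * pw + ((molL.getD (i + pat.length) ' ').toNat : Int)) % pvM) u'

def find_uniques_alt (mol : String) (trans : List (String × String)) : List String :=
  trans.foldl (fun u t =>
    if t.1.toList.length > mol.toList.length then u
    else
      pvRKLoop mol.toList t.1.toList t.2.toList
        (t.1.toList.foldl pvHashStep 0)
        (pvB ^ t.1.toList.length % pvM)
        (mol.toList.length - t.1.toList.length + 1) 0
        ((PySem.List.slice mol.toList none (some (t.1.toList.length : Int))).foldl pvHashStep 0)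
        u)
    PySem.Set.empty

-- ===== PRECONDITION & SPEC =====
def Spec_find_uniques (mol : String) (trans : List (String × String)) (out : List String) : Prop := out = find_uniques_alt mol trans
instance (mol : String) (trans : List (String × String)) (out : List String) : Decidable (Spec_find_uniques mol trans out) := by unfold Spec_find_uniques; infer_instance

-- ===== CLAIM (what is proved, stated in full; the proofs are below) =====
def Claim_equal_find_uniques : Prop := ∀ (mol : String) (trans : List (String × String)), Dom_find_uniques mol trans → Spec_find_uniques mol trans (find_uniques mol trans)

-- ===== LEMMAS AND PROOFS =====

-- common step: the insertion made at a matching position i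
def pvStepB (molL t0 t1 : List Char) (u : PySem.Set String) (i : Nat) : PySem.Set String :=
  if PySem.Chars.startswith (molL.drop i) t0 then
    PySem.Set.add u (String.ofList (molL.take i ++ t1 ++ molL.drop (i + t0.length)))
  else u

-- a block of indices none of which starts a match is skipped by the scan
theorem pvScanSkip (molL t0 t1 : List Char) (a n : Nat) (u : PySem.Set String)
    (h : ∀ j, a ≤ j → j < a + n → ¬ t0 <+: molL.drop j) :
    (List.range' a n).foldl (pvStepB molL t0 t1) u = u := by
  have hcong : (List.range' a n).foldl (pvStepB molL t0 t1) u =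
      (List.range' a n).foldl (fun acc _ => acc) u := by
    apply PySem.List.foldl_congr_mem
    intro acc j hj
    have hj' := List.mem_range'_1.mp hj
    have hns : PySem.Chars.startswith (molL.drop j) t0 = false := by
      rw [← Bool.not_eq_true, PySem.Chars.startswith_iff]
      exact h j hj'.1 hj'.2
    simp [pvStepB, hns]
  rw [hcong, PySem.List.foldl_ignore]

-- no occurrence of t0 at or after i  →  no prefix match at any j ≥ i
theorem pvNoMatchAfter (molL t0 : List Char) (i j : Nat) (hij : i ≤ j)
    (h : ¬ t0 <:+: molL.drop i) (hpre : t0 <+: molL.drop j) : False := by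
  apply h
  have h1 : molL.drop j = (molL.drop i).drop (j - i) := by
    rw [List.drop_drop]; congr 1; omega
  rw [h1] at hpre
  exact hpre.isInfix.trans (List.drop_suffix _ _).isInfix

-- A's while loop from index i equals the scan over the remaining indices i..len(mol)
theorem pvMain (molL t0 t1 : List Char) (k : Nat) :
    ∀ i u, molL.length + 1 - i ≤ k →
      pvLoopA molL t0 t1 i u =
        (List.range' i (molL.length + 1 - i)).foldl (pvStepB molL t0 t1) u := by
  induction k with
  | zero =>
    intro i u hk
    have h0 : molL.length + 1 - i = 0 := by omega
    rw [h0]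
    unfold pvLoopA
    have hno : ¬ PySem.Chars.findFrom molL t0 (i : Int) none > -1 := by
      rw [pvFindFromPast molL t0 i (by omega)]; omega
    simp [hno]
  | succ k ih =>
    intro i u hk
    unfold pvLoopA
    by_cases h : PySem.Chars.findFrom molL t0 (i : Int) none > -1
    · have hile : i ≤ molL.length := by
        by_contra hgt
        rw [pvFindFromPast molL t0 i (by omega)] at h; omega
      obtain ⟨M, hM⟩ : ∃ M : Nat, PySem.Chars.findFrom molL t0 (i : Int) none = (M : Int) :=
        ⟨_, (Int.toNat_of_nonneg (by omega)).symm⟩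
      have hspec := PySem.Chars.findFrom_natCast_spec molL t0 i hile (by omega)
      have hub := PySem.Chars.findFrom_natCast molL t0 i hile
      have hfl := PySem.Chars.find_le_length (molL.drop i) t0
      have hdl : (molL.drop i).length = molL.length - i := by simp
      rw [hdl] at hfl
      rw [hM] at hspec hub
      simp only [Int.toNat_natCast] at hspec
      have hiM : i ≤ M := by exact_mod_cast hspec.1
      have hMle : M ≤ molL.length := by split at hub <;> omega
      have h1 : List.range' i (molL.length + 1 - i) =
          List.range' i (M - i) ++ List.range' (i + 1 * (M - i)) (molL.length + 1 - M) := by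
        rw [List.range'_append]
        congr 1
        omega
      rw [show i + 1 * (M - i) = M from by omega] at h1
      rw [show molL.length + 1 - M = (molL.length - M) + 1 from by omega,
        List.range'_succ] at h1
      rw [h1, List.foldl_append]
      rw [pvScanSkip molL t0 t1 i (M - i) u (fun j hj1 hj2 => hspec.2.2 j hj1 (by omega))]
      simp only [List.foldl_cons]
      have hsw : PySem.Chars.startswith (molL.drop M) t0 = true := by
        rw [PySem.Chars.startswith_iff]; exact hspec.2.1
      have e1 : PySem.List.slice molL (some 0) (some ((M : Nat) : Int)) = molL.take M := by
        rw [show ((0 : Int)) = ((0 : Nat) : Int) from rfl, PySem.List.slice_natCast]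
        simp
      have e2 : PySem.List.slice molL (some (((M : Nat) : Int) + (t0.length : Int))) none =
          molL.drop (M + t0.length) := by
        rw [show (((M : Nat) : Int) + (t0.length : Int)) = (((M + t0.length : Nat)) : Int) from
          by push_cast; ring, PySem.List.slice_from_natCast]
      rw [dif_pos h]
      simp only [hM, Int.toNat_natCast, e1, e2]
      rw [ih (M + 1) _ (by omega)]
      rw [show molL.length + 1 - (M + 1) = molL.length - M from by omega]
      unfold pvStepB
      rw [if_pos hsw]
    · rw [dif_neg h]
      by_cases hile : i ≤ molL.length
      · have hub := PySem.Chars.findFrom_natCast molL t0 i hile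
        have hnone : ¬ t0 <:+: molL.drop i := by
          rw [← PySem.Chars.findFrom_natCast_eq_neg_one_iff molL t0 i hile]
          by_cases hf : PySem.Chars.find (molL.drop i) t0 = -1
          · rw [hub, if_pos hf]
          · exfalso
            rw [hub, if_neg hf] at h
            have hge := PySem.Chars.neg_one_le_find (s := molL.drop i) (sub := t0)
            omega
        rw [pvScanSkip]
        intro j hj1 hj2 hpre
        exact pvNoMatchAfter molL t0 i j hj1 hnone hpre
      · rw [show molL.length + 1 - i = 0 from by omega]
        simp

-- ---- Rabin-Karp correctness ----

def pvGStep (h : Int) (c : Char) : Int := h * pvB + (c.toNat : Int)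
def pvG (xs : List Char) : Int := xs.foldl pvGStep 0

-- the mod-at-each-step hash is the plain polynomial value mod M
theorem pvHashMod (xs : List Char) : ∀ a : Int,
    xs.foldl pvHashStep (a % pvM) = (xs.foldl pvGStep a) % pvM := by
  induction xs with
  | nil => intro a; rfl
  | cons x t ih =>
    intro a
    have hstep : pvHashStep (a % pvM) x = (pvGStep a x) % pvM := by
      unfold pvHashStep pvGStep pvB pvM
      omega
    simp only [List.foldl_cons, hstep, ih]

theorem pvGshift (xs : List Char) : ∀ a : Int,
    xs.foldl pvGStep a = a * pvB ^ xs.length + pvG xs := by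
  induction xs with
  | nil => intro a; simp [pvG]
  | cons x t ih =>
    intro a
    simp only [List.foldl_cons, pvG, List.length_cons]
    rw [ih (pvGStep a x), ih (pvGStep 0 x)]
    unfold pvGStep
    ring

theorem pvGsnoc (t : List Char) (y : Char) : pvG (t ++ [y]) = pvG t * pvB + (y.toNat : Int) := by
  simp [pvG, List.foldl_append, pvGStep]

-- arithmetic of the rolling update modulo M
theorem pvRollMod (g P x y : Int) :
    ((g % pvM) * pvB - x * (P % pvM) + y) % pvM = (g * pvB - x * P + y) % pvM := by
  have h1 : Int.ModEq pvM (g % pvM) g := Int.emod_emod_of_dvd g dvd_rfl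
  have h2 : Int.ModEq pvM (P % pvM) P := Int.emod_emod_of_dvd P dvd_rfl
  exact ((h1.mul_right pvB).sub ((Int.ModEq.refl x).mul h2)).add_right y

-- the RK loop with a correct running hash equals the plain scan over its indices
theorem pvRKmain (molL pat rep : List Char) :
    ∀ fuel i (h : Int) u, i + pat.length ≤ molL.length →
      fuel = molL.length - pat.length + 1 - i →
      h = pvG ((molL.drop i).take pat.length) % pvM →
      pvRKLoop molL pat rep (pvG pat % pvM) (pvB ^ pat.length % pvM) fuel i h u =
        (List.range' i fuel).foldl (pvStepB molL pat rep) u := by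
  intro fuel
  induction fuel with
  | zero => intro i h u hle hf hh; simp [pvRKLoop]
  | succ f ih =>
    intro i h u hle hf hh
    have hw : PySem.List.slice molL (some (i : Int)) (some ((i : Int) + (pat.length : Int))) =
        (molL.drop i).take pat.length := PySem.List.slice_natCast_add molL i pat.length
    have hcond : (h = pvG pat % pvM ∧
        PySem.List.slice molL (some (i : Int)) (some ((i : Int) + (pat.length : Int))) = pat) ↔
        (molL.drop i).take pat.length = pat := by
      rw [hw]
      constructor
      · exact fun hc => hc.2
      · intro he; exact ⟨by rw [hh, he], he⟩
    have hpref : PySem.Chars.startswith (molL.drop i) pat = true ↔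
        (molL.drop i).take pat.length = pat := by
      rw [PySem.Chars.startswith_iff, List.prefix_iff_eq_take, eq_comm]
    have hstr : PySem.List.slice molL none (some (i : Int)) ++ rep ++
        PySem.List.slice molL (some ((i : Int) + (pat.length : Int))) none =
        molL.take i ++ rep ++ molL.drop (i + pat.length) := by
      rw [PySem.List.slice_to_natCast,
        show ((i : Int) + (pat.length : Int)) = (((i + pat.length : Nat)) : Int) from by push_cast; ring,
        PySem.List.slice_from_natCast]
    have hu' : (if h = pvG pat % pvM ∧
        PySem.List.slice molL (some (i : Int)) (some ((i : Int) + (pat.length : Int))) = pat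
      then PySem.Set.add u (String.ofList (PySem.List.slice molL none (some (i : Int)) ++ rep ++
        PySem.List.slice molL (some ((i : Int) + (pat.length : Int))) none))
      else u) = pvStepB molL pat rep u i := by
      unfold pvStepB
      by_cases hc : (molL.drop i).take pat.length = pat
      · rw [if_pos (hcond.mpr hc), if_pos (hpref.mpr hc), hstr]
      · rw [if_neg (fun hx => hc (hcond.mp hx)), if_neg (by
          intro hx; exact hc (hpref.mp hx))]
    by_cases hend : i + pat.length = molL.length
    · have hf0 : f = 0 := by omega
      subst hf0
      unfold pvRKLoop
      rw [if_pos hend]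
      simpa using hu'.trans (by simp)
    · have hlt : i + pat.length < molL.length := by omega
      unfold pvRKLoop
      rw [if_neg hend]
      rw [show List.range' i (f + 1) = i :: List.range' (i + 1) f from rfl, List.foldl_cons]
      -- the rolled hash is the hash of the next window
      have hx : molL.getD i ' ' = molL[i]'(by omega) := List.getD_eq_getElem molL ' ' (by omega)
      have hy : molL.getD (i + pat.length) ' ' = molL[i + pat.length]'(by omega) :=
        List.getD_eq_getElem molL ' ' (by omega)
      have hroll : (h * pvB - ((molL.getD i ' ').toNat : Int) * (pvB ^ pat.length % pvM) +
            ((molL.getD (i + pat.length) ' ').toNat : Int)) % pvM =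
          pvG ((molL.drop (i + 1)).take pat.length) % pvM := by
        rw [hh, pvRollMod]
        congr 1
        rcases Nat.eq_zero_or_pos pat.length with hp | hp
        · rw [hx, hy]
          simp only [hp, List.take_zero, pow_zero, Nat.add_zero, pvG, List.foldl_nil]
          ring
        · -- window decomposition: w = molL[i] :: t, w' = t ++ [molL[i+p]]
          set p := pat.length with hpdef
          have hdropi : molL.drop i = molL[i]'(by omega) :: molL.drop (i + 1) := by
            rw [List.drop_eq_getElem_cons (by omega)]
          have hwcons : (molL.drop i).take p =
              molL[i]'(by omega) :: (molL.drop (i + 1)).take (p - 1) := by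
            rw [hdropi, show p = (p - 1) + 1 from by omega, List.take_succ_cons]
            rfl
          have hlen : p - 1 < (molL.drop (i + 1)).length := by
            simp only [List.length_drop]; omega
          have hwsnoc : (molL.drop (i + 1)).take p =
              (molL.drop (i + 1)).take (p - 1) ++ [molL[i + p]'(by omega)] := by
            conv_lhs => rw [show p = (p - 1) + 1 from by omega]
            rw [List.take_succ]
            congr 1
            rw [List.getElem?_drop, show i + 1 + (p - 1) = i + p from by omega,
              List.getElem?_eq_getElem (by omega)]
            rfl
          rw [hwcons, hwsnoc, pvGsnoc, hx, hy]
          have hGcons : pvG (molL[i]'(by omega) :: (molL.drop (i + 1)).take (p - 1)) =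
              ((molL[i]'(by omega)).toNat : Int) * pvB ^ ((molL.drop (i + 1)).take (p - 1)).length +
                pvG ((molL.drop (i + 1)).take (p - 1)) := by
            show List.foldl pvGStep (pvGStep 0 _) _ = _
            rw [pvGshift]
            unfold pvGStep
            ring
          have hlent : ((molL.drop (i + 1)).take (p - 1)).length = p - 1 := by
            simp only [List.length_take, List.length_drop]; omega
          rw [hGcons, hlent]
          have hpow : pvB ^ (p - 1) * pvB = pvB ^ p := by
            rw [← pow_succ, show p - 1 + 1 = p from by omega]
          rw [← hpow]
          ring
      rw [hroll, hu']
      rw [ih (i + 1) _ (pvStepB molL pat rep u i) (by omega) (by omega) rfl]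

-- one transformation of B equals the plain scan over all indices 0..len(mol)
theorem pvRKtrans (molL pat rep : List Char) (u : PySem.Set String) :
    (if pat.length > molL.length then u
     else pvRKLoop molL pat rep (pat.foldl pvHashStep 0) (pvB ^ pat.length % pvM)
        (molL.length - pat.length + 1) 0
        ((PySem.List.slice molL none (some (pat.length : Int))).foldl pvHashStep 0) u) =
      (List.range' 0 (molL.length + 1)).foldl (pvStepB molL pat rep) u := by
  by_cases hp : pat.length > molL.length
  · rw [if_pos hp, pvScanSkip]
    intro j hj1 hj2 hpre
    have := hpre.length_le
    simp only [List.length_drop] at this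
    omega
  · rw [if_neg hp]
    have htarget : pat.foldl pvHashStep 0 = pvG pat % pvM := by
      have := pvHashMod pat 0
      simpa [pvG] using this
    have hh0 : (PySem.List.slice molL none (some (pat.length : Int))).foldl pvHashStep 0 =
        pvG ((molL.drop 0).take pat.length) % pvM := by
      rw [PySem.List.slice_to_natCast, List.drop_zero]
      have := pvHashMod (molL.take pat.length) 0
      simpa [pvG] using this
    rw [htarget, hh0]
    rw [pvRKmain molL pat rep (molL.length - pat.length + 1) 0
      (pvG ((molL.drop 0).take pat.length) % pvM) u (by omega) (by omega) rfl]
    have hsplit : List.range' 0 (molL.length + 1) =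
        List.range' 0 (molL.length - pat.length + 1) ++
        List.range' (0 + 1 * (molL.length - pat.length + 1)) pat.length := by
      rw [List.range'_append]
      congr 1
      omega
    rw [hsplit, List.foldl_append,
      pvScanSkip molL pat rep (0 + 1 * (molL.length - pat.length + 1)) pat.length _
        (fun j hj1 hj2 hpre => by
          have := hpre.length_le
          simp only [List.length_drop] at this
          omega)]

-- ===== VERDICT (by name: the statement is the Claim_ definition above) =====
theorem find_uniques_spec : Claim_equal_find_uniques := by
  intro mol trans _
  unfold Spec_find_uniques find_uniques find_uniques_alt
  apply PySem.List.foldl_congr_mem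
  intro u t _
  rw [pvMain mol.toList t.1.toList t.2.toList (mol.toList.length + 1) 0 u (by omega)]
  rw [show mol.toList.length + 1 - 0 = mol.toList.length + 1 from by omega]
  exact (pvRKtrans mol.toList t.1.toList t.2.toList u).symm
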